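-- pv_equiv track=rewrite | github.com/iterorganization/imas-mcp | imas_mcp/search/search_modes.py | _has_explicit_technical_operators
-- ===== SOURCE A (Python) =====
-- def _has_explicit_technical_operators(query: str) -> bool:
--     """Check if query has explicit technical search operators."""
--     # Explicit technical operators that indicate user wants precise search
--     explicit_operators = [
--         "units:",
--         "documentation:",
--         "ids_name:",
--         "path:",
--         "AND",
--         "OR",
--         "NOT",
--         '"',
--         "*",
--         "~",
--     ]
--
--     return any(operator in query for operator in explicit_operators)
-- ===== SOURCE B (Python) =====
-- def _has_explicit_technical_operators(query: str) -> bool: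
--     """Check if query has explicit technical search operators (single positional scan)."""
--     ops = ("units:", "documentation:", "ids_name:", "path:", "AND", "OR", "NOT", '"', "*", "~")
--     # one left-to-right pass: at each position, does some operator start here?
--     return any(query.startswith(ops, i) for i in range(len(query)))
-- ===== Notes on version B (the rewrite author's own statement) =====
-- stated objective: alternative
-- what changed: A runs one full substring search per operator (operator-major, 10 scans of the query); B makes a single position-major left-to-right scan and at each position checks whether any operator starts there with startswith(op, i).
import Mathlib
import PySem

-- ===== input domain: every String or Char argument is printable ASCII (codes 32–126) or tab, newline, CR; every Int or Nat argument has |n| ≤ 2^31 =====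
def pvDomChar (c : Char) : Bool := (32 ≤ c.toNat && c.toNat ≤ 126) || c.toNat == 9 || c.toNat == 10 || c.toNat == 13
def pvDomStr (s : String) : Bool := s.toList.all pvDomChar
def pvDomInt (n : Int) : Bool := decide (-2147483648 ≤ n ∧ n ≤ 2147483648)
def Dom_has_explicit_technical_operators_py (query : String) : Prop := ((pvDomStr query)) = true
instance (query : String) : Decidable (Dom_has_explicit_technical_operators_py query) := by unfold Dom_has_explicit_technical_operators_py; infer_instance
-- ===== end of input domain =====

-- B replaces A's operator-major loop of 10 substring searches by a single position-major
-- left-to-right scan checking at each position whether some operator starts there (alternative).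


-- ===== PORT A =====
def pvExplicitOperators : List String :=
  ["units:", "documentation:", "ids_name:", "path:", "AND", "OR", "NOT", "\"", "*", "~"]

-- any(operator in query for operator in explicit_operators)
def has_explicit_technical_operators_py (query : String) : Bool :=
  pvExplicitOperators.any (fun op => PySem.Str.isIn op query)

-- ===== PORT B =====
def pvExplicitOperatorsAlt : List (List Char) :=
  ["units:".toList, "documentation:".toList, "ids_name:".toList, "path:".toList,
   "AND".toList, "OR".toList, "NOT".toList, "\"".toList, "*".toList, "~".toList]

-- the inner 'query.startswith(op, i) for some op' at the current position;
-- the index loop 'for i in range(len(query))' is the structural recursion over suffixes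
-- (query.startswith(op, i) = the suffix at i starts with op; exact on every input)
def pvScanAlt : List Char → Bool
  | [] => false
  | c :: rest =>
      pvExplicitOperatorsAlt.any (fun op => PySem.Chars.startswith (c :: rest) op)
      || pvScanAlt rest

def has_explicit_technical_operators_py_alt (query : String) : Bool :=
  pvScanAlt query.toList

-- ===== PRECONDITION & SPEC =====
def Spec_has_explicit_technical_operators_py (query : String) (out : Bool) : Prop := out = has_explicit_technical_operators_py_alt query
instance (query : String) (out : Bool) : Decidable (Spec_has_explicit_technical_operators_py query out) := by unfold Spec_has_explicit_technical_operators_py; infer_instance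

-- ===== CLAIM (what is proved, stated in full; the proofs are below) =====
def Claim_equal_has_explicit_technical_operators_py : Prop := ∀ (query : String), Dom_has_explicit_technical_operators_py query → Spec_has_explicit_technical_operators_py query (has_explicit_technical_operators_py query)

-- ===== LEMMAS AND PROOFS =====

-- one scan step: 'op in (c :: l)' = op starts here, or 'op in l'
lemma isIn_cons_step (op l : List Char) (c : Char) :
    PySem.Chars.isIn op (c :: l)
      = (PySem.Chars.startswith (c :: l) op || PySem.Chars.isIn op l) := by
  refine Bool.eq_iff_iff.mpr ?_
  simp only [Bool.or_eq_true, PySem.Chars.isIn_iff_infix, PySem.Chars.startswith_iff]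
  exact List.infix_cons_iff

lemma scan_eq_any_isIn (l : List Char) :
    pvScanAlt l = pvExplicitOperatorsAlt.any (fun op => PySem.Chars.isIn op l) := by
  induction l with
  | nil => decide
  | cons c rest ih =>
      simp only [pvScanAlt, ih, isIn_cons_step]
      rcases h : pvExplicitOperatorsAlt.any (fun op => PySem.Chars.startswith (c :: rest) op) with _ | _
      · simp only [Bool.false_or]
        refine Bool.eq_iff_iff.mpr ?_
        simp only [List.any_eq_true, List.any_eq_false, Bool.or_eq_true] at h ⊢
        constructor
        · rintro ⟨op, hm, hi⟩; exact ⟨op, hm, Or.inr hi⟩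
        · rintro ⟨op, hm, hi | hi⟩
          · exact absurd hi (by simp [h op hm])
          · exact ⟨op, hm, hi⟩
      · simp only [Bool.true_or]
        symm
        simp only [List.any_eq_true, Bool.or_eq_true] at h ⊢
        obtain ⟨op, hm, hs⟩ := h
        exact ⟨op, hm, Or.inl hs⟩

-- ===== VERDICT (by name: the statement is the Claim_ definition above) =====
theorem has_explicit_technical_operators_py_spec : Claim_equal_has_explicit_technical_operators_py := by
  intro query _
  unfold Spec_has_explicit_technical_operators_py has_explicit_technical_operators_py
    has_explicit_technical_operators_py_alt
  rw [scan_eq_any_isIn]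
  simp [pvExplicitOperators, pvExplicitOperatorsAlt, PySem.Str.isIn]
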